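-- pv_equiv track=rewrite | github.com/Green0-0/agent2 | OUTDATED_agent2_depreciated/utils/utils.py | get_first_import_block
-- ===== SOURCE A (Python) =====
-- def get_first_import_block(code):
--     lines = code.split('\n')
--     block_lines = []
--     in_block = False
--     open_parens = 0
--     line_continuation = False
--
--     for line in lines:
--         stripped = line.strip()
--
--         if not in_block:
--             if stripped == '' or stripped.startswith('#'):
--                 continue
--             elif 'import' in line:
--                 in_block = True
--                 block_lines.append(line)
--                 open_parens += line.count('(') - line.count(')')
--                 line_continuation = line.rstrip().endswith('\\')
--         else:
--             is_comment_or_empty = stripped == '' or stripped.startswith('#')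
--             if is_comment_or_empty:
--                 block_lines.append(line)
--                 continue
--
--             if line_continuation or open_parens > 0:
--                 block_lines.append(line)
--                 open_parens += line.count('(') - line.count(')')
--                 line_continuation = line.rstrip().endswith('\\')
--             else:
--                 if 'import' in line:
--                     block_lines.append(line)
--                     open_parens += line.count('(') - line.count(')')
--                     line_continuation = line.rstrip().endswith('\\')
--                 else:
--                     break
--
--     return '\n'.join(block_lines)
-- ===== SOURCE B (Python) =====
-- def get_first_import_block(code):
--     lines = code.split('\n')
--
--     def is_trivia(ln):
--         s = ln.strip()
--         return s == '' or s.startswith('#')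
--
--     start = next((k for k, ln in enumerate(lines)
--                   if not is_trivia(ln) and 'import' in ln), None)
--     if start is None:
--         return ''
--
--     def units(tail):
--         # group into units: a single trivia line, or a code line together with
--         # its continuation lines (open-paren balance carried across units,
--         # backslash continuation; trivia inside an active continuation stays
--         # in the unit without touching the state)
--         op = 0
--         k, n = 0, len(tail)
--         while k < n:
--             if is_trivia(tail[k]):
--                 yield [tail[k]]
--                 k += 1
--                 continue
--             grp = [tail[k]]
--             op += tail[k].count('(') - tail[k].count(')')
--             cont = tail[k].rstrip().endswith('\\')
--             k += 1
--             while k < n and (cont or op > 0):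
--                 grp.append(tail[k])
--                 if not is_trivia(tail[k]):
--                     op += tail[k].count('(') - tail[k].count(')')
--                     cont = tail[k].rstrip().endswith('\\')
--                 k += 1
--             yield grp
--
--     block = []
--     for grp in units(lines[start:]):
--         if is_trivia(grp[0]) or 'import' in grp[0]:
--             block.extend(grp)
--         else:
--             break
--     return '\n'.join(block)
-- ===== Notes on version B (the rewrite author's own statement) =====
-- stated objective: alternative
-- what changed: B first locates the starting import line, then tokenizes the remaining lines into logical units (a code line with its continuation lines, or a single trivia line) with a generator, and builds the block as a take-while over whole units, instead of A's single loop driven by an in_block flag and per-line state.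
import Mathlib
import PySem

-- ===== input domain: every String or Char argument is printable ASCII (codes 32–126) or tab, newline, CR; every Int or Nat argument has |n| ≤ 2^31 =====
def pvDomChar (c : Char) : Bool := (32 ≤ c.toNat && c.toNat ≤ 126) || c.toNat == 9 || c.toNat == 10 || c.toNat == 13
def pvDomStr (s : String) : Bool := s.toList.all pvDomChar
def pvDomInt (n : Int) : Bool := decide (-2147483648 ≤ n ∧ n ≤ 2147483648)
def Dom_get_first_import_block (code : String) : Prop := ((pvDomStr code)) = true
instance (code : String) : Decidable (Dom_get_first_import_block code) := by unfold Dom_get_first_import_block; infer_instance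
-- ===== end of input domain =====

-- B finds the starting import line, then tokenizes the tail into logical units (code
-- line + continuations, or a single trivia line) and take-whiles whole units, instead
-- of A's flag-driven single loop. Objective: alternative (same cost).

-- ===== PORT A =====
-- single loop over the lines with state (acc, in_block, open_parens, line_continuation); break returns acc
def aLoop (lines : List String) (acc : List String) (inBlock : Bool) (op : Int) (cont : Bool) : List String :=
  match lines with
  | [] => acc
  | line :: rest =>
    let stripped := PySem.Str.strip line
    if !inBlock then
      if stripped == "" || PySem.Str.startswith stripped "#" then
        aLoop rest acc inBlock op cont
      else if PySem.Str.isIn "import" line then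
        aLoop rest (acc ++ [line]) true
          (op + (PySem.Str.count line "(" : Int) - (PySem.Str.count line ")" : Int))
          (PySem.Str.endswith (PySem.Str.rstrip line) "\\")
      else
        aLoop rest acc inBlock op cont
    else
      if stripped == "" || PySem.Str.startswith stripped "#" then
        aLoop rest (acc ++ [line]) inBlock op cont
      else if cont || decide (op > 0) then
        aLoop rest (acc ++ [line]) inBlock
          (op + (PySem.Str.count line "(" : Int) - (PySem.Str.count line ")" : Int))
          (PySem.Str.endswith (PySem.Str.rstrip line) "\\")
      else if PySem.Str.isIn "import" line then
        aLoop rest (acc ++ [line]) inBlock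
          (op + (PySem.Str.count line "(" : Int) - (PySem.Str.count line ")" : Int))
          (PySem.Str.endswith (PySem.Str.rstrip line) "\\")
      else
        acc

def get_first_import_block (code : String) : String :=
  PySem.Str.join "\n" (aLoop ((PySem.Str.split? code "\n").getD []) [] false 0 false)

-- ===== PORT B =====
-- is_trivia: blank or comment line
def bTrivia (line : String) : Bool :=
  PySem.Str.strip line == "" || PySem.Str.startswith (PySem.Str.strip line) "#"

-- phase 1: 'next(k for k, ln in enumerate(lines) if …)' followed by 'lines[start:]',
-- transcribed as returning the suffix from the first matching line
def bFind (lines : List String) : Option (List String) :=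
  match lines with
  | [] => none
  | line :: rest =>
    if !(bTrivia line) && PySem.Str.isIn "import" line then some (line :: rest)
    else bFind rest

-- inner 'while k < n and (cont or op > 0)' of the units generator: collects the
-- continuation lines of the current unit; returns (continuation lines, rest, final op)
def bGrow (tail : List String) (op : Int) (cont : Bool) : List String × List String × Int :=
  match tail with
  | [] => ([], [], op)
  | line :: rest =>
    if cont || decide (op > 0) then
      let st : Int × Bool :=
        if !(bTrivia line) then
          (op + (PySem.Str.count line "(" : Int) - (PySem.Str.count line ")" : Int),
           PySem.Str.endswith (PySem.Str.rstrip line) "\\")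
        else (op, cont)
      let r := bGrow rest st.1 st.2
      (line :: r.1, r.2.1, r.2.2)
    else ([], line :: rest, op)

-- termination helper for bUnits (the port cites it in decreasing_by)
theorem bGrow_rem_le (tail : List String) : ∀ (op : Int) (cont : Bool),
    (bGrow tail op cont).2.1.length ≤ tail.length := by
  induction tail with
  | nil => intro op cont; simp [bGrow]
  | cons line rest ih =>
    intro op cont
    by_cases h : (cont || decide (op > 0)) = true <;>
      simp [bGrow, h] <;> exact le_trans (ih _ _) (Nat.le_succ _)

-- the units generator: list of units, open-paren balance op carried across units
def bUnits (tail : List String) (op : Int) : List (List String) :=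
  match tail with
  | [] => []
  | line :: rest =>
    if bTrivia line then [line] :: bUnits rest op
    else
      let r := bGrow rest
        (op + (PySem.Str.count line "(" : Int) - (PySem.Str.count line ")" : Int))
        (PySem.Str.endswith (PySem.Str.rstrip line) "\\")
      (line :: r.1) :: bUnits r.2.1 r.2.2
termination_by tail.length
decreasing_by
  · simp
  · simp; exact bGrow_rem_le rest _ _

-- the outer for-loop: extend the block unit by unit, break at the first
-- non-trivia unit whose head line has no 'import'
def bTake (units : List (List String)) : List String :=
  match units with
  | [] => []
  | grp :: rest =>
    if bTrivia (grp.headD "") || PySem.Str.isIn "import" (grp.headD "") then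
      grp ++ bTake rest
    else []

def get_first_import_block_alt (code : String) : String :=
  match bFind ((PySem.Str.split? code "\n").getD []) with
  | none => ""
  | some tail => PySem.Str.join "\n" (bTake (bUnits tail 0))

-- ===== PRECONDITION & SPEC =====
def Spec_get_first_import_block (code : String) (out : String) : Prop := out = get_first_import_block_alt code
instance (code : String) (out : String) : Decidable (Spec_get_first_import_block code out) := by unfold Spec_get_first_import_block; infer_instance

-- ===== CLAIM (what is proved, stated in full; the proofs are below) =====
def Claim_equal_get_first_import_block : Prop := ∀ (code : String), Dom_get_first_import_block code → Spec_get_first_import_block code (get_first_import_block code)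

-- ===== LEMMAS AND PROOFS =====

-- proof-only abstraction of A's in-block phase (what aLoop appends once inBlock)
def aCollect (lines : List String) (op : Int) (cont : Bool) : List String :=
  match lines with
  | [] => []
  | line :: rest =>
    let s := PySem.Str.strip line
    if s == "" || PySem.Str.startswith s "#" then
      line :: aCollect rest op cont
    else if cont || decide (op > 0) || PySem.Str.isIn "import" line then
      line :: aCollect rest
        (op + (PySem.Str.count line "(" : Int) - (PySem.Str.count line ")" : Int))
        (PySem.Str.endswith (PySem.Str.rstrip line) "\\")
    else []

theorem aLoop_inBlock (rest : List String) : ∀ (acc : List String) (op : Int) (cont : Bool),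
    aLoop rest acc true op cont = acc ++ aCollect rest op cont := by
  induction rest with
  | nil => intro acc op cont; simp [aLoop, aCollect]
  | cons line tail ih =>
    intro acc op cont
    by_cases hA : PySem.Str.strip line = "" <;>
    by_cases hB : PySem.Chars.startswith (PySem.Chars.strip line.toList) ['#'] = true <;>
    by_cases hC : PySem.Chars.isIn ['i', 'm', 'p', 'o', 'r', 't'] line.toList = true <;>
    by_cases hD : cont = true <;>
    by_cases hE : (0:Int) < op <;>
    simp [aLoop, aCollect, hA, hB, hC, hD, hE, ih]

-- key bridge: A's in-block collection = current unit's continuations + unit take-while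
theorem aCollect_eq_units (tail : List String) : ∀ (op : Int) (cont : Bool),
    aCollect tail op cont =
      (bGrow tail op cont).1 ++ bTake (bUnits (bGrow tail op cont).2.1 (bGrow tail op cont).2.2) := by
  induction tail with
  | nil => intro op cont; simp [aCollect, bGrow, bUnits, bTake]
  | cons line rest ih =>
    intro op cont
    by_cases hG : (cont || decide (op > 0)) = true
    · -- continuation active: line joins the current unit on both sides
      by_cases hT : bTrivia line = true
      · have hT' := hT
        simp [bTrivia] at hT'
        rcases hT' with h | h <;>
          simp [aCollect, bGrow, hG, bTrivia, h, ih]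
      · have hT' := hT
        simp [bTrivia] at hT'
        simp [aCollect, bGrow, hG, bTrivia, hT'.1, hT'.2, ih]
    · -- continuation inactive: bGrow stops, new unit starts here
      have hGrow : bGrow (line :: rest) op cont = ([], line :: rest, op) := by
        simp [bGrow, hG]
      rw [hGrow]
      simp only [List.nil_append]
      by_cases hT : bTrivia line = true
      · have hT' := hT
        simp [bTrivia] at hT'
        have hrest : aCollect rest op cont =
            (bGrow rest op cont).1 ++ bTake (bUnits (bGrow rest op cont).2.1 (bGrow rest op cont).2.2) := ih op cont
        have hstop : bGrow rest op cont = ([], rest, op) := by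
          cases rest with
          | nil => simp [bGrow]
          | cons l r => simp [bGrow, hG]
        rcases hT' with h | h <;>
          simp [aCollect, bUnits, bTake, bTrivia, h, hrest, hstop]
      · have hT' := hT
        simp [bTrivia] at hT'
        by_cases hI : PySem.Chars.isIn ['i', 'm', 'p', 'o', 'r', 't'] line.toList = true
        · simp [aCollect, bUnits, bTake, bTrivia, hT'.1, hT'.2, hI, hG, ih]
        · simp [aCollect, bUnits, bTake, bTrivia, hT'.1, hT'.2, hI, hG]

-- A's search phase matches bFind followed by the unit pipeline
theorem aLoop_search (lines : List String) :
    aLoop lines [] false 0 false =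
      match bFind lines with
      | none => []
      | some tail => bTake (bUnits tail 0) := by
  induction lines with
  | nil => simp [aLoop, bFind]
  | cons line tail ih =>
    by_cases hA : PySem.Str.strip line = "" <;>
    by_cases hB : PySem.Chars.startswith (PySem.Chars.strip line.toList) ['#'] = true <;>
    by_cases hC : PySem.Chars.isIn ['i', 'm', 'p', 'o', 'r', 't'] line.toList = true <;>
    simp [aLoop, bFind, bTrivia, hA, hB, hC, ih, aLoop_inBlock, aCollect_eq_units,
          bUnits, bTake]

-- ===== VERDICT (by name: the statement is the Claim_ definition above) =====
theorem get_first_import_block_spec : Claim_equal_get_first_import_block := by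
  intro code _
  unfold Spec_get_first_import_block get_first_import_block get_first_import_block_alt
  rw [aLoop_search]
  cases h : bFind ((PySem.Str.split? code "\n").getD []) with
  | none => simp [PySem.Str.join]
  | some p => rfl
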